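-- pv_equiv track=rewrite | github.com/linkaform/modules | accesos/items/scripts/Accesos/app.py | set_format_location
-- ===== SOURCE A (Python) =====
-- def set_format_location(data):
--     data_answers = {
--         'folio':'',
--         'location':'',
--         'booth':'',
--         'status':'',
--     };
--     for x in data:
--         folio = x.get('folio','');
--         catalogo_nombre_caseta = x.get('catalogo_nombre_caseta','');
--         catalogo_nombre_ubicacion = x.get('catalogo_nombre_ubicacion','');
--         status = x.get('status','');
--         data_answers['folio'] = folio
--         data_answers['location'] = catalogo_nombre_ubicacion
--         data_answers['booth'] = catalogo_nombre_caseta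
--         data_answers['status'] = status
--     return data_answers;
-- ===== SOURCE B (Python) =====
-- def set_format_location(data):
--     if data:
--         x = data[-1]
--         return {
--             'folio': x.get('folio', ''),
--             'location': x.get('catalogo_nombre_ubicacion', ''),
--             'booth': x.get('catalogo_nombre_caseta', ''),
--             'status': x.get('status', ''),
--         }
--     return {'folio': '', 'location': '', 'booth': '', 'status': ''}
-- ===== Notes on version B (the rewrite author's own statement) =====
-- stated objective: simpler
-- what changed: B replaces the loop that overwrites the same four dict keys on every iteration by a direct read of the last element (data[-1]) with an empty-list guard.
import Mathlib
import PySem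

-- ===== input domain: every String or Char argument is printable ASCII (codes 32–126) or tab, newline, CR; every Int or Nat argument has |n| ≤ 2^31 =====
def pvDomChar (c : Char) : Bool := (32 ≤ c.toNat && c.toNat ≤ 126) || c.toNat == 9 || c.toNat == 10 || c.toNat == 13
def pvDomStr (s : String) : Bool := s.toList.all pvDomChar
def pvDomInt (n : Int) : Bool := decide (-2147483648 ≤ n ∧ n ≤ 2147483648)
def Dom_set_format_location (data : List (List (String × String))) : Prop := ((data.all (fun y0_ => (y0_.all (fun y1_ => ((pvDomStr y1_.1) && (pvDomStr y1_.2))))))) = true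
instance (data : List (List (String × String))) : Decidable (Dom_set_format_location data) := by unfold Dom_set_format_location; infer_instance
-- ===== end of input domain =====

-- B reads only the last element of data (with an empty guard) instead of A's loop that overwrites the same four keys each iteration.


-- ===== PORT A =====
-- x.get(k, ''): first-match lookup in the association list (a Python dict has unique keys)
def pyGetS (x : List (String × String)) (k : String) : String :=
  (PySem.Dict.mk x).getD k ""

def set_format_location (data : List (List (String × String))) : List (String × String) :=
  (data.foldl (fun d x =>
      let folio := pyGetS x "folio"
      let catalogo_nombre_caseta := pyGetS x "catalogo_nombre_caseta"
      let catalogo_nombre_ubicacion := pyGetS x "catalogo_nombre_ubicacion"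
      let status := pyGetS x "status"
      ((((d.insert "folio" folio).insert "location" catalogo_nombre_ubicacion).insert
          "booth" catalogo_nombre_caseta).insert "status" status))
    (PySem.Dict.ofList [("folio", ""), ("location", ""), ("booth", ""), ("status", "")])).items

-- ===== PORT B =====
def set_format_location_alt (data : List (List (String × String))) : List (String × String) :=
  match data.getLast? with
  | none => [("folio", ""), ("location", ""), ("booth", ""), ("status", "")]
  | some x =>
      [("folio", pyGetS x "folio"),
       ("location", pyGetS x "catalogo_nombre_ubicacion"),
       ("booth", pyGetS x "catalogo_nombre_caseta"),
       ("status", pyGetS x "status")]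

-- ===== PRECONDITION & SPEC =====
def Spec_set_format_location (data : List (List (String × String))) (out : List (String × String)) : Prop := out = set_format_location_alt data
instance (data : List (List (String × String))) (out : List (String × String)) : Decidable (Spec_set_format_location data out) := by unfold Spec_set_format_location; infer_instance

-- ===== CLAIM (what is proved, stated in full; the proofs are below) =====
def Claim_equal_set_format_location : Prop := ∀ (data : List (List (String × String))), Dom_set_format_location data → Spec_set_format_location data (set_format_location data)

-- ===== LEMMAS AND PROOFS =====

-- ===== VERDICT (by name: the statement is the Claim_ definition above) =====
-- One loop step on a dict of the fixed four-key shape just replaces the four values.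
theorem step_mk (x : List (String × String)) (v1 v2 v3 v4 : String) :
    (((((PySem.Dict.mk [("folio", v1), ("location", v2), ("booth", v3), ("status", v4)]).insert
          "folio" (pyGetS x "folio")).insert
          "location" (pyGetS x "catalogo_nombre_ubicacion")).insert
          "booth" (pyGetS x "catalogo_nombre_caseta")).insert
          "status" (pyGetS x "status")) =
    PySem.Dict.mk [("folio", pyGetS x "folio"),
                   ("location", pyGetS x "catalogo_nombre_ubicacion"),
                   ("booth", pyGetS x "catalogo_nombre_caseta"),
                   ("status", pyGetS x "status")] := by
  simp [PySem.Dict.insert, PySem.Dict.contains]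

-- Loop invariant: starting from any dict of the shape [folio,location,booth,status],
-- the fold's items are determined by the last element of data (or the start values if empty).
theorem fold_last (data : List (List (String × String))) (v1 v2 v3 v4 : String) :
    (data.foldl (fun d x =>
        let folio := pyGetS x "folio"
        let catalogo_nombre_caseta := pyGetS x "catalogo_nombre_caseta"
        let catalogo_nombre_ubicacion := pyGetS x "catalogo_nombre_ubicacion"
        let status := pyGetS x "status"
        ((((d.insert "folio" folio).insert "location" catalogo_nombre_ubicacion).insert
            "booth" catalogo_nombre_caseta).insert "status" status))
      (PySem.Dict.mk [("folio", v1), ("location", v2), ("booth", v3), ("status", v4)])).items =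
    match data.getLast? with
    | none => [("folio", v1), ("location", v2), ("booth", v3), ("status", v4)]
    | some x =>
        [("folio", pyGetS x "folio"),
         ("location", pyGetS x "catalogo_nombre_ubicacion"),
         ("booth", pyGetS x "catalogo_nombre_caseta"),
         ("status", pyGetS x "status")] := by
  induction data generalizing v1 v2 v3 v4 with
  | nil => rfl
  | cons x xs ih =>
      rw [List.foldl_cons]
      show (xs.foldl _
        (((((PySem.Dict.mk [("folio", v1), ("location", v2), ("booth", v3), ("status", v4)]).insert
          "folio" (pyGetS x "folio")).insert
          "location" (pyGetS x "catalogo_nombre_ubicacion")).insert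
          "booth" (pyGetS x "catalogo_nombre_caseta")).insert
          "status" (pyGetS x "status"))).items = _
      rw [step_mk, ih]
      cases xs <;> rfl

theorem set_format_location_spec : Claim_equal_set_format_location := by
  intro data _
  unfold Spec_set_format_location set_format_location set_format_location_alt
  rw [show (PySem.Dict.ofList [("folio", ""), ("location", ""), ("booth", ""), ("status", "")] : PySem.Dict String String) =
      PySem.Dict.mk [("folio", ""), ("location", ""), ("booth", ""), ("status", "")] from by decide]
  exact fold_last data "" "" "" ""
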